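-- pv_equiv track=rewrite | github.com/Nithron/NithronAI | packages/toolpacks/code_pack.py | _extract_python_docstring
-- ===== SOURCE A (Python) =====
-- from typing import List, Optional, Dict, Any, Set
--
-- def _extract_python_docstring(lines: List[str], start: int) -> Optional[str]:
--     """Extract Python docstring."""
--     if start >= len(lines):
--         return None
--
--     line = lines[start].strip()
--
--     if line.startswith('"""') or line.startswith("'''"):
--         quote = line[:3]
--         if line.endswith(quote) and len(line) > 6:
--             return line[3:-3].strip()
--
--         # Multi-line docstring
--         docstring_lines = [line[3:]]
--         for i in range(start + 1, min(start + 20, len(lines))):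
--             if quote in lines[i]:
--                 idx = lines[i].index(quote)
--                 docstring_lines.append(lines[i][:idx])
--                 break
--             docstring_lines.append(lines[i])
--
--         return '\n'.join(docstring_lines).strip()
--
--     return None
-- ===== SOURCE B (Python) =====
-- from typing import List, Optional
--
-- def _extract_python_docstring(lines: List[str], start: int) -> Optional[str]:
--     """Extract Python docstring (join-and-search re-implementation)."""
--     if start >= len(lines):
--         return None
--
--     line = lines[start].strip()
--     if not (line.startswith('"""') or line.startswith("'''")):
--         return None
--
--     quote = line[:3]
--     if line.endswith(quote) and len(line) > 6:
--         return line[3:-3].strip()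
--
--     head = line[3:]
--     tail = '\n'.join(lines[start + 1 : start + 20])
--     pos = tail.find(quote)
--     body = tail if pos < 0 else tail[:pos]
--     return (head + '\n' + body).strip()
-- ===== Notes on version B (the rewrite author's own statement) =====
-- stated objective: simpler
-- what changed: The multi-line case's per-line scan-with-break loop (appending each line, cutting at lines[i].index(quote)) is replaced by joining the next-19-lines window once and doing a single substring find on the joined text.
-- outside the precondition, e.g. on _extract_python_docstring(['q', '"""a', 'x'], -2): A returns 'a\nx\nq', B returns 'a\nx'
import Mathlib
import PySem

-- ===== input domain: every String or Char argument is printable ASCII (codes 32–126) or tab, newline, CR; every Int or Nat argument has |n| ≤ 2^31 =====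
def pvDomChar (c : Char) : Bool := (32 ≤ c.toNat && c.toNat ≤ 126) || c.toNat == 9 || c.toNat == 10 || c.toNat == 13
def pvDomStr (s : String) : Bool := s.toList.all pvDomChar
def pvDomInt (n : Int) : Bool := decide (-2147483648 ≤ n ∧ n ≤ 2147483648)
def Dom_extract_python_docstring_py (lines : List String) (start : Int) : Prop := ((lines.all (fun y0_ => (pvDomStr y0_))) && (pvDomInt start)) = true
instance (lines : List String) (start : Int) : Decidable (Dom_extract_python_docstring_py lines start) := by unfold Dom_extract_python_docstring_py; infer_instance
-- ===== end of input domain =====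

-- B replaces A's per-line scan-and-break loop for the multi-line case by joining the
-- candidate lines once and doing a single substring search (objective: simpler decomposition).


-- ===== PORT A =====
-- the 'for i in range(start+1, min(start+20, len(lines)))' loop with its break
def extract_python_docstring_py_loop (lines : List String) (quote : String) : List Int → List String → List String
  | [], acc => acc
  | i :: rest, acc =>
    let li := PySem.List.pyGetD lines i ""
    if PySem.Str.isIn quote li then
      acc ++ [PySem.Str.slice li none (some (PySem.Str.find li quote))]
    else
      extract_python_docstring_py_loop lines quote rest (acc ++ [li])

def extract_python_docstring_py (lines : List String) (start : Int) : Option String :=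
  if start ≥ (lines.length : Int) then none
  else
    match PySem.List.pyGet? lines start with
    | none => none  -- IndexError on start < -len(lines); excluded by Pre_
    | some raw =>
      let line := PySem.Str.strip raw
      if PySem.Str.startswith line "\"\"\"" || PySem.Str.startswith line "'''" then
        let quote := PySem.Str.slice line none (some 3)
        if PySem.Str.endswith line quote && decide (PySem.Str.len line > 6) then
          some (PySem.Str.strip (PySem.Str.slice line (some 3) (some (-3))))
        else
          let idxs := PySem.List.pyRange (start + 1) (min (start + 20) (lines.length : Int)) 1
          let docstring_lines := extract_python_docstring_py_loop lines quote idxs [PySem.Str.slice line (some 3) none]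
          some (PySem.Str.strip (PySem.Str.join "\n" docstring_lines))
      else none

-- ===== PORT B =====
def extract_python_docstring_py_alt (lines : List String) (start : Int) : Option String :=
  if start ≥ (lines.length : Int) then none
  else
    match PySem.List.pyGet? lines start with
    | none => none  -- IndexError on start < -len(lines); excluded by Pre_
    | some raw =>
      let line := PySem.Str.strip raw
      if !(PySem.Str.startswith line "\"\"\"" || PySem.Str.startswith line "'''") then none
      else
        let quote := PySem.Str.slice line none (some 3)
        if PySem.Str.endswith line quote && decide (PySem.Str.len line > 6) then
          some (PySem.Str.strip (PySem.Str.slice line (some 3) (some (-3))))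
        else
          let head := PySem.Str.slice line (some 3) none
          let tail := PySem.Str.join "\n" (PySem.List.slice lines (some (start + 1)) (some (start + 20)))
          let pos := PySem.Str.find tail quote
          let body := if pos < 0 then tail else PySem.Str.slice tail none (some pos)
          some (PySem.Str.strip (head ++ "\n" ++ body))

-- ===== PRECONDITION & SPEC =====
-- Pre_ keeps the natural domain 0 ≤ start (start is a line number): a negative start triggers
-- Python's negative-index wraparound in A (lines[start], then a range over negative indices that
-- re-reads lines from the end; IndexError when start < -len(lines)), accidental behaviour B does
-- not reproduce.
def Pre_extract_python_docstring_py (_lines : List String) (start : Int) : Prop := 0 ≤ start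
instance (lines : List String) (start : Int) : Decidable (Pre_extract_python_docstring_py lines start) := by unfold Pre_extract_python_docstring_py; infer_instance

def pvWitness_extract_python_docstring_py : List String × Int := (["\"\"\"doc", "body'", "\"\"\""], 0)

def Spec_extract_python_docstring_py (lines : List String) (start : Int) (out : Option String) : Prop := out = extract_python_docstring_py_alt lines start
instance (lines : List String) (start : Int) (out : Option String) : Decidable (Spec_extract_python_docstring_py lines start out) := by unfold Spec_extract_python_docstring_py; infer_instance

-- ===== CLAIM (what is proved, stated in full; the proofs are below) =====
def Claim_equal_extract_python_docstring_py : Prop := ∀ (lines : List String) (start : Int), Dom_extract_python_docstring_py lines start → Pre_extract_python_docstring_py lines start → Spec_extract_python_docstring_py lines start (extract_python_docstring_py lines start)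

-- ===== LEMMAS AND PROOFS =====

-- A's loop, rephrased on the list of scanned lines (proof-side only)
def pvScan (q : String) : List String → List String
  | [] => []
  | y :: ys =>
    if PySem.Str.isIn q y then [PySem.Str.slice y none (some (PySem.Str.find y q))]
    else y :: pvScan q ys

-- pvScan on the Chars side
def pvScanC (q : List Char) : List (List Char) → List (List Char)
  | [] => []
  | y :: ys =>
    if 0 ≤ PySem.Chars.find y q then [y.take (PySem.Chars.find y q).toNat]
    else y :: pvScanC q ys

-- B's 'tail up to the closing quote' on the Chars side
def pvBodyC (q t : List Char) : List Char :=
  if PySem.Chars.find t q < 0 then t else t.take (PySem.Chars.find t q).toNat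

lemma pvScan_cons (q y : String) (ys : List String) :
    pvScan q (y :: ys) = if PySem.Str.isIn q y then [PySem.Str.slice y none (some (PySem.Str.find y q))]
      else y :: pvScan q ys := rfl

lemma pvLoop_eq_scan (lines : List String) (q : String) :
    ∀ (n : Nat) (a b : Int) (acc : List String), (b - a).toNat = n → 0 ≤ a → b ≤ (lines.length : Int) →
    extract_python_docstring_py_loop lines q (PySem.List.pyRange a b 1) acc
      = acc ++ pvScan q ((lines.drop a.toNat).take n) := by
  intro n
  induction n with
  | zero =>
    intro a b acc h ha hb
    rw [PySem.List.pyRange_one_eq_nil (by omega)]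
    simp [extract_python_docstring_py_loop, pvScan]
  | succ m ih =>
    intro a b acc h ha hb
    have hab : a < b := by omega
    have hlt : a.toNat < lines.length := by omega
    rw [PySem.List.pyRange_one_cons hab]
    have hget : PySem.List.pyGetD lines a "" = lines[a.toNat] :=
      PySem.List.pyGetD_eq_getElem lines "" ha (by omega)
    have hdrop : lines.drop a.toNat = lines[a.toNat] :: lines.drop (a.toNat + 1) :=
      List.drop_eq_getElem_cons hlt
    simp only [extract_python_docstring_py_loop, hget]
    by_cases hin : PySem.Str.isIn q lines[a.toNat]
    · rw [if_pos hin, hdrop, List.take_succ_cons, pvScan_cons, if_pos hin]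
    · rw [if_neg hin, ih (a + 1) b (acc ++ [lines[a.toNat]]) (by omega) (by omega) hb]
      rw [hdrop, show (a + 1).toNat = a.toNat + 1 by omega, List.take_succ_cons,
        pvScan_cons, if_neg hin]
      simp

lemma pvScan_toList (q : String) (ys : List String) :
    (pvScan q ys).map String.toList = pvScanC q.toList (ys.map String.toList) := by
  induction ys with
  | nil => rfl
  | cons y t ih =>
    by_cases h : PySem.Str.isIn q y
    · have h0 : 0 ≤ PySem.Chars.find y.toList q.toList := by
        rw [PySem.Chars.find_nonneg_iff, ← PySem.Chars.isIn_iff_infix]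
        rw [PySem.Str.isIn] at h
        exact h
      simp only [pvScan, pvScanC, List.map_cons, if_pos h, if_pos h0, List.map]
      rw [PySem.Str.toList_slice]
      have hfind : PySem.Str.find y q = PySem.Chars.find y.toList q.toList := by
        simp [PySem.Str.find_eq]
      rw [hfind, PySem.Chars.slice_eq_listSlice, PySem.List.slice_to _ h0]
    · have h0 : ¬ 0 ≤ PySem.Chars.find y.toList q.toList := by
        rw [PySem.Chars.find_nonneg_iff, ← PySem.Chars.isIn_iff_infix]
        rw [PySem.Str.isIn] at h
        exact h
      simp only [pvScan, pvScanC, List.map_cons, if_neg h, if_neg h0, List.map]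
      rw [ih]

lemma pvStrip_newline_right (cs : List Char) :
    PySem.Chars.strip (cs ++ ['\n']) = PySem.Chars.strip cs := by
  unfold PySem.Chars.strip PySem.Chars.rstrip
  have h : PySem.Chars.lstrip (cs ++ ['\n']) = PySem.Chars.lstrip cs ++ ['\n'] ∨
      PySem.Chars.lstrip (cs ++ ['\n']) = [] ∧ PySem.Chars.lstrip cs = [] := by
    unfold PySem.Chars.lstrip
    induction cs with
    | nil => right; simp [List.dropWhile]; rfl
    | cons c cs ih =>
      simp only [List.cons_append, List.dropWhile]
      cases hc : PySem.Chars.isspace c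
      · left; simp
      · simpa using ih
  rcases h with h | ⟨h1, h2⟩
  · rw [h]; simp [List.dropWhile]
    rfl
  · rw [h1, h2]

-- prefix of q (no newline in q) through a newline boundary
lemma pvPrefix_newline (q u : List Char) (r : List Char) (hn : ('\n' : Char) ∉ q) :
    q <+: u ++ '\n' :: r ↔ q <+: u := by
  constructor
  · intro h
    by_cases hl : q.length ≤ u.length
    · rw [List.prefix_iff_eq_take] at h ⊢
      rwa [List.take_append_of_le_length hl] at h
    · exfalso
      obtain ⟨t, ht⟩ := h
      have hg : (q ++ t)[u.length]? = some '\n' := by rw [ht]; simp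
      rw [List.getElem?_append_left (by omega)] at hg
      exact hn (List.mem_of_getElem? hg)
  · intro h; exact h.trans (List.prefix_append _ _)

-- find points at position v when there is an occurrence at v and none below
lemma pvFind_pin (s q : List Char) (v : Nat) (hv : q <+: s.drop v)
    (hmin : ∀ i < v, ¬ q <+: s.drop i) : PySem.Chars.find s q = v := by
  have hin : q <:+: s := (PySem.Chars.isIn_iff_infix q s).mp
    ((PySem.Chars.exists_prefix_drop_iff_isIn q s).mp ⟨v, hv⟩)
  have h0 : 0 ≤ PySem.Chars.find s q := (PySem.Chars.find_nonneg_iff s q).mpr hin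
  obtain ⟨hp, hm⟩ := PySem.Chars.find_spec h0
  have h1 : (PySem.Chars.find s q).toNat ≤ v := by
    by_contra hc; push Not at hc; exact hm v hc hv
  have h2 : v ≤ (PySem.Chars.find s q).toNat := by
    by_contra hc; push Not at hc; exact hmin _ hc hp
  omega

lemma pvNoOcc (y q : List Char) (h : PySem.Chars.find y q < 0) : ∀ j, ¬ q <+: y.drop j := by
  have hne : PySem.Chars.find y q = -1 := by
    have := PySem.Chars.neg_one_le_find y q; omega
  have hni : ¬ q <:+: y := (PySem.Chars.find_eq_neg_one_iff y q).mp hne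
  intro j hj
  exact hni ((PySem.Chars.isIn_iff_infix q y).mp
    ((PySem.Chars.exists_prefix_drop_iff_isIn q y).mp ⟨j, hj⟩))

-- the first occurrence of q in 'y ++ "\n" ++ r' in terms of its occurrences in y and r
lemma pvFind_append (q y r : List Char) (hn : ('\n' : Char) ∉ q) :
    PySem.Chars.find (y ++ '\n' :: r) q =
      if PySem.Chars.find y q < 0 then
        (if PySem.Chars.find r q < 0 then -1 else (y.length : Int) + 1 + PySem.Chars.find r q)
      else PySem.Chars.find y q := by
  have hdropLe : ∀ j : Nat, j ≤ y.length → (y ++ '\n' :: r).drop j = y.drop j ++ '\n' :: r :=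
    fun j hj => List.drop_append_of_le_length hj
  have hdropGt : ∀ k : Nat, (y ++ '\n' :: r).drop (y.length + 1 + k) = r.drop k := by
    intro k
    simp only [List.drop_append]
    rw [List.drop_of_length_le (by omega), show y.length + 1 + k - y.length = k + 1 by omega,
      List.drop_succ_cons]
    simp
  split_ifs with h1 h2
  · rw [PySem.Chars.find_eq_neg_one_iff]
    intro hin
    obtain ⟨j, hj⟩ := (PySem.Chars.exists_prefix_drop_iff_isIn q (y ++ '\n' :: r)).mpr
      ((PySem.Chars.isIn_iff_infix q _).mpr hin)
    by_cases hjy : j ≤ y.length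
    · rw [hdropLe j hjy, pvPrefix_newline q _ r hn] at hj
      exact pvNoOcc y q h1 _ hj
    · have : j = y.length + 1 + (j - y.length - 1) := by omega
      rw [this, hdropGt] at hj
      exact pvNoOcc r q h2 _ hj
  · have h0 : 0 ≤ PySem.Chars.find r q := by omega
    obtain ⟨hp, hm⟩ := PySem.Chars.find_spec h0
    have hv : PySem.Chars.find (y ++ '\n' :: r) q = ((y.length + 1 + (PySem.Chars.find r q).toNat : Nat) : Int) := by
      apply pvFind_pin
      · rw [hdropGt]; exact hp
      · intro i hi hpre
        by_cases hiy : i ≤ y.length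
        · rw [hdropLe i hiy, pvPrefix_newline q _ r hn] at hpre
          exact pvNoOcc y q h1 _ hpre
        · have hieq : i = y.length + 1 + (i - y.length - 1) := by omega
          rw [hieq, hdropGt] at hpre
          exact hm _ (by omega) hpre
    rw [hv]; push_cast; omega
  · have h0 : 0 ≤ PySem.Chars.find y q := by omega
    obtain ⟨hp, hm⟩ := PySem.Chars.find_spec h0
    have hle : (PySem.Chars.find y q).toNat ≤ y.length := by
      have := PySem.Chars.find_le_length y q; omega
    have hv : PySem.Chars.find (y ++ '\n' :: r) q = ((PySem.Chars.find y q).toNat : Nat) := by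
      apply pvFind_pin
      · rw [hdropLe _ hle]
        exact hp.trans (List.prefix_append _ _)
      · intro i hi hpre
        rw [hdropLe i (by omega), pvPrefix_newline q _ r hn] at hpre
        exact hm _ hi hpre
    rw [hv]; omega

lemma pvTake_mid (y r : List Char) (k : Nat) :
    (y ++ '\n' :: r).take (y.length + 1 + k) = y ++ '\n' :: r.take k := by
  simp only [List.take_append]
  rw [List.take_of_length_le (by omega), show y.length + 1 + k - y.length = k + 1 by omega,
    List.take_succ_cons]

lemma pvBodyC_append (q y r : List Char) (hn : ('\n' : Char) ∉ q) :
    pvBodyC q (y ++ '\n' :: r) =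
      if 0 ≤ PySem.Chars.find y q then y.take (PySem.Chars.find y q).toNat
      else y ++ '\n' :: pvBodyC q r := by
  have hf := pvFind_append q y r hn
  by_cases hy : PySem.Chars.find y q < 0
  · by_cases hr : PySem.Chars.find r q < 0
    · have hs : PySem.Chars.find (y ++ '\n' :: r) q = -1 := by rw [hf]; simp [hy, hr]
      unfold pvBodyC
      rw [hs, if_pos (by norm_num), if_neg (by omega), if_pos hr]
    · have hs : PySem.Chars.find (y ++ '\n' :: r) q = (y.length : Int) + 1 + PySem.Chars.find r q := by
        rw [hf]; simp [hy, hr]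
      unfold pvBodyC
      rw [hs, if_neg (by omega), if_neg (by omega), if_neg hr,
        show ((y.length : Int) + 1 + PySem.Chars.find r q).toNat
          = y.length + 1 + (PySem.Chars.find r q).toNat by omega, pvTake_mid]
  · have hs : PySem.Chars.find (y ++ '\n' :: r) q = PySem.Chars.find y q := by
      rw [hf]; simp [hy]
    have hle : (PySem.Chars.find y q).toNat ≤ y.length := by
      have := PySem.Chars.find_le_length y q; omega
    unfold pvBodyC
    rw [hs, if_neg hy, if_pos (by omega), List.take_append_of_le_length hle]

lemma pvJoin_shift (a b : List Char) (L : List (List Char)) :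
    PySem.Chars.join ['\n'] ((a ++ '\n' :: b) :: L) = a ++ '\n' :: PySem.Chars.join ['\n'] (b :: L) := by
  cases L with
  | nil => rw [PySem.Chars.join_singleton, PySem.Chars.join_singleton]
  | cons c cs => rw [PySem.Chars.join_cons_cons, PySem.Chars.join_cons_cons]; simp

lemma pvBodyC_nil (q : List Char) : pvBodyC q [] = [] := by
  unfold pvBodyC; split <;> simp

-- the heart: A's scanned lines, joined, strip to the same string as B's head + body
lemma pvCore (q : List Char) (hn : ('\n' : Char) ∉ q) :
    ∀ (ys : List (List Char)) (head : List Char),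
    PySem.Chars.strip (PySem.Chars.join ['\n'] (head :: pvScanC q ys))
      = PySem.Chars.strip (head ++ '\n' :: pvBodyC q (PySem.Chars.join ['\n'] ys)) := by
  intro ys
  induction ys with
  | nil =>
    intro head
    show PySem.Chars.strip (PySem.Chars.join ['\n'] [head]) = _
    rw [PySem.Chars.join_singleton]
    show _ = PySem.Chars.strip (head ++ '\n' :: pvBodyC q (PySem.Chars.join ['\n'] []))
    have hj : PySem.Chars.join ['\n'] ([] : List (List Char)) = [] := rfl
    rw [hj, pvBodyC_nil]
    exact (pvStrip_newline_right head).symm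
  | cons y ys ih =>
    intro head
    by_cases hy : 0 ≤ PySem.Chars.find y q
    · show PySem.Chars.strip (PySem.Chars.join ['\n'] (head :: pvScanC q (y :: ys))) = _
      have hsc : pvScanC q (y :: ys) = [y.take (PySem.Chars.find y q).toNat] := by
        cases ys <;> simp [pvScanC, hy]
      rw [hsc, PySem.Chars.join_cons_cons, PySem.Chars.join_singleton]
      have hb : pvBodyC q (PySem.Chars.join ['\n'] (y :: ys)) = y.take (PySem.Chars.find y q).toNat := by
        cases ys with
        | nil =>
          rw [PySem.Chars.join_singleton]
          unfold pvBodyC; rw [if_neg (by omega)]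
        | cons z zs =>
          rw [PySem.Chars.join_cons_cons, show y ++ ['\n'] ++ PySem.Chars.join ['\n'] (z :: zs)
            = y ++ '\n' :: PySem.Chars.join ['\n'] (z :: zs) by simp,
            pvBodyC_append q _ _ hn, if_pos hy]
      rw [hb]
      simp
    · show PySem.Chars.strip (PySem.Chars.join ['\n'] (head :: pvScanC q (y :: ys))) = _
      have hsc : pvScanC q (y :: ys) = y :: pvScanC q ys := by
        cases ys <;> simp [pvScanC, hy]
      rw [hsc, PySem.Chars.join_cons_cons,
        show head ++ ['\n'] ++ PySem.Chars.join ['\n'] (y :: pvScanC q ys)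
          = head ++ '\n' :: PySem.Chars.join ['\n'] (y :: pvScanC q ys) by simp,
        ← pvJoin_shift, ih]
      cases ys with
      | nil =>
        have hj : PySem.Chars.join ['\n'] ([] : List (List Char)) = [] := rfl
        rw [PySem.Chars.join_singleton, hj, pvBodyC_nil]
        have hb : pvBodyC q y = y := by unfold pvBodyC; rw [if_pos (by omega)]
        rw [hb, show (head ++ '\n' :: y) ++ '\n' :: ([] : List Char) = (head ++ '\n' :: y) ++ ['\n'] by simp,
          pvStrip_newline_right]
      | cons z zs =>
        rw [PySem.Chars.join_cons_cons, show y ++ ['\n'] ++ PySem.Chars.join ['\n'] (z :: zs)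
            = y ++ '\n' :: PySem.Chars.join ['\n'] (z :: zs) by simp,
          pvBodyC_append q _ _ hn, if_neg hy]
        simp

lemma pvSlice_window (lines : List String) (start : Int) (h1 : start < (lines.length : Int)) (hpre' : 0 ≤ start) :
    (lines.drop (start + 1).toNat).take ((min (start + 20) (lines.length : Int)) - (start + 1)).toNat
      = PySem.List.slice lines (some (start + 1)) (some (start + 20)) := by
  rw [PySem.List.slice_toNat lines (by omega) (by omega)]
  by_cases hc : start + 20 ≤ (lines.length : Int)
  · congr 1
    omega
  · rw [List.take_of_length_le (by simp; omega), List.take_of_length_le (by simp; omega)]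

-- ===== VERDICT (by name: the statement is the Claim_ definition above) =====
set_option maxHeartbeats 1000000 in
theorem extract_python_docstring_py_spec : Claim_equal_extract_python_docstring_py := by
  intro lines start _ hpre
  unfold Spec_extract_python_docstring_py
  have hpre' : (0 : Int) ≤ start := hpre
  by_cases h1 : start ≥ (lines.length : Int)
  · simp [extract_python_docstring_py, extract_python_docstring_py_alt, h1]
  · have hlt : start.toNat < lines.length := by omega
    have hget : PySem.List.pyGet? lines start = some lines[start.toNat] :=
      PySem.List.pyGet?_eq_some_getElem lines hpre' (by omega)
    simp only [extract_python_docstring_py, extract_python_docstring_py_alt, if_neg h1, hget]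
    cases hsw : (PySem.Str.startswith (PySem.Str.strip lines[start.toNat]) "\"\"\"" ||
        PySem.Str.startswith (PySem.Str.strip lines[start.toNat]) "'''") with
    | false => simp
    | true =>
      simp only [Bool.not_true, Bool.false_eq_true, if_false, if_true]
      cases hsl : (PySem.Str.endswith (PySem.Str.strip lines[start.toNat])
            (PySem.Str.slice (PySem.Str.strip lines[start.toNat]) none (some 3)) &&
          decide (PySem.Str.len (PySem.Str.strip lines[start.toNat]) > 6)) with
      | true => rw [if_pos rfl, if_pos rfl]
      | false =>
        simp only [Bool.false_eq_true, if_false]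
        set line := PySem.Str.strip lines[start.toNat] with hline
        set quote := PySem.Str.slice line none (some 3) with hquote
        set head := PySem.Str.slice line (some 3) with hhead
        -- A's index loop is the scan of the sliced lines
        rw [pvLoop_eq_scan lines quote ((min (start + 20) (lines.length : Int)) - (start + 1)).toNat
          (start + 1) (min (start + 20) (lines.length : Int)) [head] rfl (by omega) (by omega)]
        rw [pvSlice_window lines start (by omega) hpre', List.singleton_append]
        set ysB := PySem.List.slice lines (some (start + 1)) (some (start + 20)) with hysB
        set tl := PySem.Str.join "\n" ysB with htl
        -- quote is three identical quote characters, so it contains no newline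
        have hq3 : quote.toList = line.toList.take 3 := by
          rw [hquote, PySem.Str.toList_slice, PySem.Chars.slice_eq_listSlice,
            PySem.List.slice_to _ (by norm_num)]
          rfl
        have hn : ('\n' : Char) ∉ quote.toList := by
          rcases Bool.or_eq_true_iff.mp hsw with h | h
          · have hp := (PySem.Chars.startswith_iff line.toList "\"\"\"".toList).mp
              (by rw [← PySem.Str.startswith_eq]; exact h)
            rw [List.prefix_iff_eq_take] at hp
            rw [hq3, ← show ("\"\"\"".toList).length = 3 by rfl, ← hp]
            decide
          · have hp := (PySem.Chars.startswith_iff line.toList "'''".toList).mp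
              (by rw [← PySem.Str.startswith_eq]; exact h)
            rw [List.prefix_iff_eq_take] at hp
            rw [hq3, ← show ("'''".toList).length = 3 by rfl, ← hp]
            decide
        -- pass to Lists of Chars
        apply congrArg some
        apply String.toList_inj.mp
        rw [PySem.Str.toList_strip, PySem.Str.toList_strip, PySem.Str.toList_join,
          List.map_cons, pvScan_toList]
        have hnl : ("\n" : String).toList = ['\n'] := rfl
        have hbody : (if PySem.Str.find tl quote < 0 then tl
            else PySem.Str.slice tl none (some (PySem.Str.find tl quote))).toList
            = pvBodyC quote.toList tl.toList := by
          rw [pvBodyC]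
          have hfe : PySem.Str.find tl quote = PySem.Chars.find tl.toList quote.toList := by
            simp [PySem.Str.find_eq]
          by_cases hpos : PySem.Str.find tl quote < 0
          · rw [if_pos hpos, if_pos (by rw [← hfe]; exact hpos)]
          · rw [if_neg hpos, if_neg (by rw [← hfe]; exact hpos), PySem.Str.toList_slice,
              PySem.Chars.slice_eq_listSlice, PySem.List.slice_to _ (by omega), hfe]
        have hra : (head ++ "\n" ++ (if PySem.Str.find tl quote < 0 then tl
            else PySem.Str.slice tl none (some (PySem.Str.find tl quote)))).toList
            = head.toList ++ '\n' :: pvBodyC quote.toList tl.toList := by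
          rw [String.toList_append, String.toList_append, hbody, hnl]
          simp
        rw [hra, hnl]
        have htlL : tl.toList = PySem.Chars.join ['\n'] (ysB.map String.toList) := by
          rw [htl, PySem.Str.toList_join, hnl]
        rw [htlL]
        exact pvCore quote.toList hn (ysB.map String.toList) head.toList
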